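-- pv_equiv track=rewrite | github.com/ilkka-torma/griddy | src/griddy/alphabet.py | is_nat
-- ===== SOURCE A (Python) =====
-- def is_nat(string):
--     if not string:
--         return False
--     if string == '0':
--         return True
--     if string[0] != '0' and all(c in "0123456789" for c in string):
--         return True
--     return False
-- ===== SOURCE B (Python) =====
-- import re
--
-- _NAT_RE = re.compile(r'0|[1-9][0-9]*')
--
-- def is_nat(string):
--     if not string:
--         return False
--     return _NAT_RE.fullmatch(string) is not None
-- ===== Notes on version B (the rewrite author's own statement) =====
-- stated objective: idiomatic
-- what changed: Replaces the explicit first-char test plus per-character membership scan with a single precompiled regular-expression fullmatch of the canonical natural-number pattern 0|[1-9][0-9]*.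
import Mathlib
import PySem

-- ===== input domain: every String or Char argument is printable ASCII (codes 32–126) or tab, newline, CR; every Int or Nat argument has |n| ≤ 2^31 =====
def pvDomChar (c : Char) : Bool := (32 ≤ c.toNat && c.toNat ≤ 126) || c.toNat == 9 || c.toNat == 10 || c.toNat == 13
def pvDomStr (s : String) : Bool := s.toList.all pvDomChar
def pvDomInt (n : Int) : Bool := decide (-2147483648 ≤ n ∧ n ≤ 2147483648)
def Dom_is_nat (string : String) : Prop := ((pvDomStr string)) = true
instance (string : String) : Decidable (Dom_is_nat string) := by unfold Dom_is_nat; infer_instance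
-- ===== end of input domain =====

-- B replaces A's explicit first-char test and per-character membership scan with a
-- regular-expression fullmatch of the canonical pattern 0|[1-9][0-9]* (idiomatic, same cost).


-- ===== PORT A =====
def is_nat (string : String) : Bool :=
  if string.toList = [] then false        -- `if not string:` (empty string is falsy)
  else if string = "0" then true
  else if (match PySem.Str.pyGet? string 0 with     -- string[0] (in range: string is nonempty here)
           | some c => decide (c ≠ '0')
           | none => false)
          && string.toList.all (fun c => ("0123456789".toList).contains c) then true
  else false

-- ===== PORT B =====
-- hand-written port of _NAT_RE.fullmatch on r'0|[1-9][0-9]*': exact for this pattern —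
-- the first alternative matches iff the string is exactly "0"; the second matches a
-- [1-9] head followed by a [0-9]* tail.
def pvNatRegexMatch (l : List Char) : Bool :=
  match l with
  | [] => false
  | c :: rest =>
      (decide (c = '0') && decide (rest = []))
      || ((decide ('1' ≤ c) && decide (c ≤ '9'))
          && rest.all (fun d => decide ('0' ≤ d) && decide (d ≤ '9')))

def is_nat_alt (string : String) : Bool :=
  if string.toList = [] then false        -- `if not string:` (empty string is falsy)
  else pvNatRegexMatch string.toList

-- ===== PRECONDITION & SPEC =====
def Spec_is_nat (string : String) (out : Bool) : Prop := out = is_nat_alt string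
instance (string : String) (out : Bool) : Decidable (Spec_is_nat string out) := by unfold Spec_is_nat; infer_instance

-- ===== CLAIM (what is proved, stated in full; the proofs are below) =====
def Claim_equal_is_nat : Prop := ∀ (string : String), Dom_is_nat string → Spec_is_nat string (is_nat string)

-- ===== LEMMAS AND PROOFS =====

theorem pv_char_le (c d : Char) : (c ≤ d) ↔ c.toNat ≤ d.toNat := by
  rw [Char.le_def, UInt32.le_iff_toNat_le]; rfl

theorem pv_char_eq (c d : Char) : (c = d) ↔ c.toNat = d.toNat := by
  rw [Char.ext_iff, UInt32.ext_iff]; rfl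

-- membership in the literal digit string is the same test as the [0-9] range check
theorem pv_mem_digits (c : Char) :
    (("0123456789".toList).contains c) = (decide ('0' ≤ c) && decide (c ≤ '9')) := by
  rw [Bool.eq_iff_iff]
  have h : "0123456789".toList = ['0','1','2','3','4','5','6','7','8','9'] := by decide
  simp only [h, List.contains_cons, List.contains_nil, Bool.or_eq_true, beq_iff_eq,
    Bool.and_eq_true, decide_eq_true_eq, pv_char_le, pv_char_eq, Bool.or_false,
    show ('0':Char).toNat = 48 from rfl, show ('1':Char).toNat = 49 from rfl,
    show ('2':Char).toNat = 50 from rfl, show ('3':Char).toNat = 51 from rfl,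
    show ('4':Char).toNat = 52 from rfl, show ('5':Char).toNat = 53 from rfl,
    show ('6':Char).toNat = 54 from rfl, show ('7':Char).toNat = 55 from rfl,
    show ('8':Char).toNat = 56 from rfl, show ('9':Char).toNat = 57 from rfl]
  omega

-- "not zero and a digit" is the same as "in [1-9]"
theorem pv_nonzero_digit (c : Char) :
    (decide (c ≠ '0') && (decide ('0' ≤ c) && decide (c ≤ '9')))
      = (decide ('1' ≤ c) && decide (c ≤ '9')) := by
  rw [Bool.eq_iff_iff]
  simp only [Bool.and_eq_true, decide_eq_true_eq, ne_eq, pv_char_le, pv_char_eq,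
    show ('0':Char).toNat = 48 from rfl, show ('9':Char).toNat = 57 from rfl,
    show ('1':Char).toNat = 49 from rfl]
  omega

theorem pv_string_eq_zero (s : String) : (s = "0") ↔ s.toList = ['0'] := by
  constructor
  · rintro rfl; decide
  · intro h
    have h2 := congrArg String.ofList h
    simpa using h2

-- ===== VERDICT (by name: the statement is the Claim_ definition above) =====
theorem is_nat_spec : Claim_equal_is_nat := by
  intro s _
  unfold Spec_is_nat is_nat is_nat_alt
  by_cases hnil : s.toList = []
  · simp [hnil]
  · simp only [hnil, if_false]
    obtain ⟨c, cs, hl⟩ : ∃ c cs, s.toList = c :: cs := by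
      cases h : s.toList with
      | nil => exact absurd h hnil
      | cons a b => exact ⟨a, b, rfl⟩
    have hget : PySem.Str.pyGet? s 0 = some c := by
      simp [PySem.Str.pyGet?, PySem.List.pyGet?, PySem.List.pyIdx?, hl]
    by_cases hz : s = "0"
    · have h0 : s.toList = ['0'] := (pv_string_eq_zero s).mp hz
      subst hz
      simp [pvNatRegexMatch]
    · have hne : s.toList ≠ ['0'] := fun h => hz ((pv_string_eq_zero s).mpr h)
      rw [hl] at hne
      simp only [hz, if_false, hget, hl, pvNatRegexMatch, List.all_cons, pv_mem_digits]
      by_cases hc0 : c = '0'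
      · have hcs : cs ≠ [] := by
          intro h; exact hne (by rw [hc0, h])
        simp [hc0, hcs, show ¬ ('1':Char) ≤ '0' from by decide]
      · simp only [hc0, decide_false, Bool.false_and, Bool.false_or]
        rw [← Bool.and_assoc, pv_nonzero_digit, Bool.and_assoc]
        cases h : (decide ('1' ≤ c) && (decide (c ≤ '9') && cs.all fun d => decide ('0' ≤ d) && decide (d ≤ '9'))) <;> simp
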